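-- pv_equiv track=rewrite | github.com/i-zro/TIL | 3. Algorithms/220925 스터디/프로_순위검색_1.py | solution
-- ===== SOURCE A (Python) =====
-- def solution(info, query):
--     answer = []
--
--     for q in query:
--         # query 조건 정리 리스트
--         condition = list(qq.strip() for qq in q.replace('and', '').replace('  ',' ').split(' '))
--         num = 0
--
--         for i in info:
--             participant = list(ii.strip() for ii in i.split(' '))
--             for e,(c,p) in enumerate(zip(condition, participant)):
--                 if c == '-':
--                     continue
--                 if c != p and not (c.isdigit() and int(c) <= int(p)):
--                     break
--                 if e == len(condition)-1:
--                     num += 1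
--
--         answer.append(num)
--
--     return answer
-- ===== SOURCE B (Python) =====
-- def _tokens(s):
--     return [t.strip() for t in s.split(' ')]
--
--
-- def _conditions(q):
--     return _tokens(q.replace('and', '').replace('  ', ' '))
--
--
-- def _row_matches(cond, row):
--     # a row matches when it has a value for every condition and each one passes
--     if len(row) < len(cond):
--         return False
--     return all(c == '-' or c == p or (c.isdigit() and int(c) <= int(p))
--                for c, p in zip(cond, row))
--
--
-- def solution(info, query):
--     # parse each participant row once and fold duplicates into a frequency table
--     counts = {}
--     for line in info:
--         key = tuple(_tokens(line))
--         counts[key] = counts.get(key, 0) + 1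
--     return [sum(n for row, n in counts.items() if _row_matches(_conditions(q), row))
--             for q in query]
-- ===== Notes on version B (the rewrite author's own statement) =====
-- stated objective: alternative
-- what changed: B parses every participant row once into a frequency dict over distinct parsed rows and answers each query by summing the counts of the distinct rows a declarative matcher accepts, instead of A's per-query re-parsing of every row with an indexed break/continue scan; Pre_ excludes the inputs where a digit-only condition token is zipped against a participant token int() cannot parse (there A raises ValueError, except when an earlier token already fails the same comparison and both programs return the same count).
-- intended difference: On queries whose parsed condition list ends with the wildcard '-' while some participant row satisfies all its conditions, A returns 0 for that query (its loop 'continue's on the final '-' and never reaches the counting branch) while B counts the matching rows, which is what a wildcard condition means. — e.g. on solution(["a"], ["-"]): A returns [0], B returns [1]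
-- outside the precondition, e.g. on solution(['a b'], ['x 5']): A returns [0], B returns [0]
import Mathlib
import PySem

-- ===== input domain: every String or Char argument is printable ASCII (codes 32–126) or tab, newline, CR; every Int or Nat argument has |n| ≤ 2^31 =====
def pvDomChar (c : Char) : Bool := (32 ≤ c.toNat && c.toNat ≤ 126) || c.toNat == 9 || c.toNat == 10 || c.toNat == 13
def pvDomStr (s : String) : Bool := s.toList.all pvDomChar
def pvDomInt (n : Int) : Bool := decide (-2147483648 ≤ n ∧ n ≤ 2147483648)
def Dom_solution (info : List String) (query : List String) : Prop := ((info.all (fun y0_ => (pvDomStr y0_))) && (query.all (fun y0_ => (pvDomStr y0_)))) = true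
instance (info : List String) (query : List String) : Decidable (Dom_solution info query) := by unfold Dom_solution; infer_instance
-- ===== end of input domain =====

-- B parses each participant row once and aggregates duplicates in a frequency table, answering each
-- query by summing the counts of the distinct rows a declarative matcher accepts (objective: alternative).

-- ===== PORT A =====

-- int(s); exact wherever it is reached inside Pre_solution (no ValueError there)
def pvIntv (s : String) : Int := (PySem.Int.ofStr? s).getD 0

-- s.split(' ') — separator " " is non-empty, so split? is always `some` and the default is never used
def pvSplitSp (s : String) : List String := (PySem.Str.split? s " ").getD []

-- list(t.strip() for t in s.split(' ')) — A's participant parse and B's _tokens are the same expression,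
-- so both ports (and D_solution) share this one helper
def pvTokens (s : String) : List String := (pvSplitSp s).map (fun t => PySem.Str.strip t)

-- list(t.strip() for t in q.replace('and','').replace('  ',' ').split(' ')) — A's condition parse
-- and B's _conditions, shared likewise
def pvCond (q : String) : List String :=
  (pvSplitSp (PySem.Str.replace (PySem.Str.replace q "and" "") "  " " ")).map
    (fun t => PySem.Str.strip t)

-- the inner `for e,(c,p) in enumerate(zip(condition, participant))` loop with continue/break
def pvInnerA (L : Nat) (pairs : List (String × String)) (e : Nat) (num : Int) : Int :=
  match pairs with
  | [] => num
  | (c, p) :: rest =>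
    if c = "-" then pvInnerA L rest (e + 1) num
    else if c ≠ p ∧ ¬(PySem.Str.strIsdigit c = true ∧ pvIntv c ≤ pvIntv p) then num
    else if e = L - 1 then pvInnerA L rest (e + 1) (num + 1)
    else pvInnerA L rest (e + 1) num

def solution (info : List String) (query : List String) : List Int :=
  query.foldl (fun answer q =>
    let condition := pvCond q
    let num := info.foldl (fun num i =>
      pvInnerA condition.length (condition.zip (pvTokens i)) 0 num) 0
    answer ++ [num]) []

-- ===== PORT B =====

-- one conjunct of the all(...) in _row_matches
def pvPassB (cp : String × String) : Bool :=
  cp.1 == "-" || cp.1 == cp.2 ||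
    (PySem.Str.strIsdigit cp.1 && decide (pvIntv cp.1 ≤ pvIntv cp.2))

-- _row_matches(cond, row)
def pvMatchesB (cond row : List String) : Bool :=
  if row.length < cond.length then false
  else (cond.zip row).all pvPassB

def solution_alt (info : List String) (query : List String) : List Int :=
  let counts := info.foldl
    (fun d i =>
      let key := pvTokens i
      d.insert key (d.getD key 0 + 1))
    (PySem.Dict.empty : PySem.Dict (List String) Int)
  query.map (fun q =>
    ((counts.items.filter (fun kv => pvMatchesB (pvCond q) kv.1)).map (fun kv => kv.2)).sum)

-- ===== PRECONDITION & SPEC =====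
-- Pre_ excludes the inputs where a digit-only condition token is zipped against a participant token
-- that int() cannot parse: there Python A raises ValueError — except on the few such inputs where an
-- earlier token of the same row already fails the comparison, on which A returns and agrees with B
-- (the exact raise set would require re-simulating A's left-to-right scan; see the cite in claim.json).
def Pre_solution (info : List String) (query : List String) : Prop :=
  ∀ q ∈ query, ∀ i ∈ info, ∀ cp ∈ (pvCond q).zip (pvTokens i),
    PySem.Str.strIsdigit cp.1 = true → cp.1 ≠ cp.2 → (PySem.Int.ofStr? cp.2).isSome = true
instance (info : List String) (query : List String) : Decidable (Pre_solution info query) := by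
  unfold Pre_solution; infer_instance

def pvWitness_solution : List String × List String := (["a 10"], ["a 5"])

-- On queries whose parsed condition list ends with the wildcard '-' while some participant row
-- satisfies all its conditions, A returns 0 for that query (its loop 'continue's on the final '-'
-- and never reaches the counting branch) while B counts the matching rows, which is what a
-- wildcard condition means.
def D_solution (info : List String) (query : List String) : Prop :=
  ∃ q ∈ query, (pvCond q).getLastD "" = "-" ∧
    ∃ i ∈ info, (pvCond q).length ≤ (pvTokens i).length ∧
      ∀ cp ∈ (pvCond q).zip (pvTokens i),
        cp.1 = "-" ∨ cp.1 = cp.2 ∨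
          (PySem.Str.strIsdigit cp.1 = true ∧ pvIntv cp.1 ≤ pvIntv cp.2)
instance (info : List String) (query : List String) : Decidable (D_solution info query) := by
  unfold D_solution; infer_instance

def Spec_solution (info : List String) (query : List String) (out : List Int) : Prop := ¬ D_solution info query → out = solution_alt info query
instance (info : List String) (query : List String) (out : List Int) : Decidable (Spec_solution info query out) := by unfold Spec_solution; infer_instance

def pvDiffWitness_solution : List String × List String := (["a"], ["-"])
def pvDiffWitnessOut_solution : (List Int) × (List Int) := ([0], [1])

-- ===== CLAIM (what is proved, stated in full; the proofs are below) =====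
def Claim_unchanged_solution : Prop := ∀ (info : List String) (query : List String), Dom_solution info query → Pre_solution info query → Spec_solution info query (solution info query)
def Claim_changed_solution : Prop := Dom_solution (pvDiffWitness_solution.1) (pvDiffWitness_solution.2) ∧ Pre_solution (pvDiffWitness_solution.1) (pvDiffWitness_solution.2) ∧ D_solution (pvDiffWitness_solution.1) (pvDiffWitness_solution.2) ∧ solution (pvDiffWitness_solution.1) (pvDiffWitness_solution.2) = pvDiffWitnessOut_solution.1 ∧ solution_alt (pvDiffWitness_solution.1) (pvDiffWitness_solution.2) = pvDiffWitnessOut_solution.2 ∧ pvDiffWitnessOut_solution.1 ≠ pvDiffWitnessOut_solution.2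
def Claim_exact_solution : Prop := ∀ (info : List String) (query : List String), Dom_solution info query → Pre_solution info query → D_solution info query → solution info query ≠ solution_alt info query

-- ===== LEMMAS AND PROOFS =====

-- A's per-row match, read off its break/continue scan: the row is long enough, every zipped pair
-- passes, and the LAST condition is not '-' (the final continue skips the counting branch)
def pvMSA (cs ps : List String) : Bool :=
  !decide (ps.length < cs.length) && !(cs.getLastD "" == "-") && (cs.zip ps).all pvPassB

-- B's per-row match in the same normal form
def pvMSB (cs ps : List String) : Bool :=
  !decide (ps.length < cs.length) && (cs.zip ps).all pvPassB

theorem pvMatchesB_eq_MSB (cond row : List String) : pvMatchesB cond row = pvMSB cond row := by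
  rw [pvMatchesB, pvMSB]
  by_cases h : row.length < cond.length <;> simp [h]

theorem pvPassB_iff (c p : String) :
    pvPassB (c, p) = true ↔
      (c = "-" ∨ c = p ∨ (PySem.Str.strIsdigit c = true ∧ pvIntv c ≤ pvIntv p)) := by
  simp [pvPassB, or_assoc]

theorem pvSplitOn_go_ne_nil (sep : List Char) (fuel : Nat) (l cur : List Char)
    (acc : List (List Char)) : PySem.Chars.splitOn.go sep fuel l cur acc ≠ [] := by
  induction fuel generalizing l cur acc with
  | zero => simp [PySem.Chars.splitOn.go]
  | succ n ih =>
    cases l with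
    | nil => simp [PySem.Chars.splitOn.go]
    | cons c rest =>
      rw [PySem.Chars.splitOn.go]
      split
      · exact ih _ _ _
      · exact ih _ _ _

theorem pvSplitSp_ne_nil (s : String) : pvSplitSp s ≠ [] := by
  simp only [pvSplitSp, PySem.Str.split?, PySem.Chars.split?]
  simp [PySem.Chars.splitOn, pvSplitOn_go_ne_nil]

theorem pvCond_ne_nil (q : String) : pvCond q ≠ [] := by
  simp [pvCond, pvSplitSp_ne_nil]

theorem pvGetLastD_ne_default {α : Type} (xs : List α) (h : xs ≠ []) (d d' : α) :
    xs.getLastD d = xs.getLastD d' := by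
  cases xs with
  | nil => simp at h
  | cons x t =>
    simp only [List.getLastD_eq_getLast?]
    cases h' : (x :: t).getLast? with
    | none => simp at h'
    | some y => simp

theorem pvMSA_cons_cons (c p : String) (cs' ps' : List String) (hne : cs' ≠ [])
    (hpass : pvPassB (c, p) = true) :
    pvMSA (c :: cs') (p :: ps') = pvMSA cs' ps' := by
  rw [pvMSA, pvMSA]
  have hlen : (decide ((p :: ps').length < (c :: cs').length)) =
      (decide (ps'.length < cs'.length)) := by simp
  have hlast : (c :: cs').getLastD "" = cs'.getLastD "" := by
    rw [List.getLastD_cons]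
    exact pvGetLastD_ne_default cs' hne c ""
  rw [hlen, hlast, List.zip_cons_cons, List.all_cons, hpass, Bool.true_and]

-- the inner loop on a suffix cs (at index e, full length e + |cs|) adds 1 exactly on an A-match
theorem pvInnerA_eq_MSA (cs : List String) :
    ∀ (ps : List String) (e : Nat) (num : Int), cs ≠ [] →
      pvInnerA (e + cs.length) (cs.zip ps) e num = num + (if pvMSA cs ps then 1 else 0) := by
  induction cs with
  | nil => intro _ _ _ h; exact absurd rfl h
  | cons c cs' ih =>
    intro ps e num _
    cases ps with
    | nil =>
      simp [List.zip_nil_right, pvInnerA, pvMSA]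
    | cons p ps' =>
      rw [List.zip_cons_cons, pvInnerA]
      by_cases hdash : c = "-"
      · rw [if_pos hdash]
        cases hcs' : cs' with
        | nil =>
          subst hcs'
          simp [List.zip_nil_left, pvInnerA, pvMSA, hdash]
        | cons y ys =>
          rw [← hcs']
          have hne : cs' ≠ [] := by rw [hcs']; simp
          have harith : e + (c :: cs').length = (e + 1) + cs'.length := by
            simp [List.length_cons]; omega
          rw [harith, ih ps' (e + 1) num hne,
            pvMSA_cons_cons c p cs' ps' hne (by simp [pvPassB, hdash])]
      · rw [if_neg hdash]
        by_cases hbrk : c ≠ p ∧ ¬(PySem.Str.strIsdigit c = true ∧ pvIntv c ≤ pvIntv p)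
        · rw [if_pos hbrk]
          have hpass : pvPassB (c, p) = false := by
            have h2 := hbrk.2
            simp [pvPassB, hdash, hbrk.1]
            intro hd
            have hnle : ¬ (pvIntv c ≤ pvIntv p) :=
              fun hle => h2 ⟨by simpa using hd, hle⟩
            omega
          have hMS : pvMSA (c :: cs') (p :: ps') = false := by
            simp [pvMSA, List.zip_cons_cons, List.all_cons, hpass]
          rw [hMS]; simp
        · rw [if_neg hbrk]
          have hpass : pvPassB (c, p) = true := by
            push_neg at hbrk
            by_cases hcp : c = p
            · simp [pvPassB, hcp]
            · have h2 := hbrk hcp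
              simp [pvPassB, h2.2]
              exact Or.inr (by simpa using h2.1)
          cases hcs' : cs' with
          | nil =>
            subst hcs'
            have he : e = e + ([c] : List String).length - 1 := by simp
            rw [if_pos he, List.zip_nil_left, pvInnerA]
            have hMS : pvMSA [c] (p :: ps') = true := by
              simp [pvMSA, hpass, hdash]
            rw [hMS]; simp
          | cons y ys =>
            rw [← hcs']
            have hne : cs' ≠ [] := by rw [hcs']; simp
            have hnee : ¬ e = e + (c :: cs').length - 1 := by
              rw [hcs']; simp
            rw [if_neg hnee]
            have harith : e + (c :: cs').length = (e + 1) + cs'.length := by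
              simp [List.length_cons]; omega
            rw [harith, ih ps' (e + 1) num hne, pvMSA_cons_cons c p cs' ps' hne hpass]

-- A's per-query loop counts exactly the parsed participants that satisfy pvMSA
theorem pvAQuery (cond : List String) (hc : cond ≠ []) (info : List String) :
    info.foldl (fun num i => pvInnerA cond.length (cond.zip (pvTokens i)) 0 num) 0
      = ((info.map pvTokens).countP (fun p => pvMSA cond p) : Int) := by
  have hstep : ∀ (num : Int) (i : String), i ∈ info →
      pvInnerA cond.length (cond.zip (pvTokens i)) 0 num
        = if pvMSA cond (pvTokens i) then num + 1 else num := by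
    intro num i _
    have h := pvInnerA_eq_MSA cond (pvTokens i) 0 num hc
    rw [Nat.zero_add] at h
    rw [h]
    split <;> ring
  have h2 := PySem.List.foldl_congr_mem
      (f := fun num i => pvInnerA cond.length (cond.zip (pvTokens i)) 0 num)
      (g := fun (num : Int) (i : String) => if pvMSA cond (pvTokens i) then num + 1 else num)
      (init := (0 : Int)) (l := info) hstep
  rw [h2, PySem.List.foldl_if_add_one (fun i => pvMSA cond (pvTokens i)) info 0,
    List.countP_map]
  norm_num
  apply List.countP_congr
  intro a _
  simp [Function.comp_def]

theorem pvSolutionA (info query : List String) :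
    solution info query
      = query.map (fun q => ((info.map pvTokens).countP (fun p => pvMSA (pvCond q) p) : Int)) := by
  rw [solution]
  have h1 : (fun (answer : List Int) (q : String) =>
      let condition := pvCond q
      let num := info.foldl
        (fun num i => pvInnerA condition.length (condition.zip (pvTokens i)) 0 num) 0
      answer ++ [num])
      = fun (answer : List Int) (q : String) => answer ++
          [info.foldl (fun num i =>
            pvInnerA (pvCond q).length ((pvCond q).zip (pvTokens i)) 0 num) 0] := rfl
  rw [h1, PySem.List.foldl_append_singleton_eq_map
    (f := fun q => info.foldl (fun num i =>
      pvInnerA (pvCond q).length ((pvCond q).zip (pvTokens i)) 0 num) 0)]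
  simp only [List.nil_append]
  apply List.map_congr_left
  intro q _
  exact pvAQuery (pvCond q) (pvCond_ne_nil q) info

-- B's dict is Counter(parts); its items are the distinct parsed rows with their counts
set_option maxHeartbeats 1000000 in
theorem pvSolutionB (info query : List String) :
    solution_alt info query
      = query.map (fun q =>
          (((PySem.Set.ofList (info.map pvTokens)).filter (fun k => pvMSB (pvCond q) k)).map
            (fun k => (((info.map pvTokens).count k : Nat) : Int))).sum) := by
  simp only [solution_alt]
  have hc : info.foldl (fun d i => d.insert (pvTokens i) (d.getD (pvTokens i) 0 + 1))
      (PySem.Dict.empty : PySem.Dict (List String) Int)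
      = PySem.Dict.counter (info.map pvTokens) := by
    rw [← PySem.Dict.foldl_insert_getD_add_one_eq_counter, List.foldl_map]
  simp only [hc, PySem.Dict.items_counter, List.filter_map, List.map_map]
  apply List.map_congr_left
  intro q _
  apply congrArg List.sum
  have hfil : ∀ x ∈ PySem.Set.ofList (info.map pvTokens),
      ((fun (kv : List String × Int) => pvMatchesB (pvCond q) kv.1) ∘
        (fun k : List String => (k, (((info.map pvTokens).count k : Nat) : Int)))) x
        = (fun k : List String => pvMSB (pvCond q) k) x :=
    fun x _ => by simp [Function.comp, pvMatchesB_eq_MSB]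
  rw [List.filter_congr hfil]
  rfl

-- sum over a Nodup list of (g k + [k = x]) is the sum of g plus one if x occurs
theorem pvSumIndicator {α : Type} [DecidableEq α] (S : List α) (g : α → Int) (x : α)
    (hnd : S.Nodup) :
    (S.map (fun k => g k + (if k = x then 1 else 0))).sum
      = (S.map g).sum + (if x ∈ S then 1 else 0) := by
  induction S with
  | nil => simp
  | cons k S' ih =>
    rw [List.nodup_cons] at hnd
    by_cases hkx : k = x
    · have hx : x ∉ S' := hkx ▸ hnd.1
      have h0 : (S'.map (fun k => g k + (if k = x then 1 else 0))) = S'.map g := by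
        apply List.map_congr_left; intro a ha
        have hax : ¬ a = x := fun h => hx (h ▸ ha)
        simp [hax]
      simp only [List.map_cons, List.sum_cons, h0]
      simp [hkx]
      ring
    · simp only [List.map_cons, List.sum_cons, ih hnd.2]
      have hxm : (x ∈ k :: S') ↔ (x ∈ S') := by
        simp [List.mem_cons]
        intro h; exact absurd h.symm hkx
      simp only [hkx, if_false]
      by_cases hxS : x ∈ S' <;> simp [hxS, hxm] <;> ring

-- the key counting identity: summing the multiplicities of the distinct matching rows
-- is counting the matching rows
theorem pvCountK (P : List String → Bool) (xs : List (List String)) :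
    (((PySem.Set.ofList xs).filter P).map (fun k => ((xs.count k : Nat) : Int))).sum
      = ((xs.countP P : Nat) : Int) := by
  induction xs using List.reverseRecOn with
  | nil => simp [PySem.Set.ofList]
  | append_singleton xs x ih =>
    rw [PySem.Set.ofList_append_singleton, PySem.Set.add_eq_ite]
    by_cases hx : x ∈ PySem.Set.ofList xs
    · rw [if_pos hx]
      have hx' : x ∈ xs := by simpa [PySem.Set.mem_ofList] using hx
      have hcnt : ∀ k : List String, k ∈ (PySem.Set.ofList xs).filter P →
          (((xs ++ [x]).count k : Nat) : Int)
            = ((xs.count k : Nat) : Int) + (if k = x then 1 else 0) := by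
        intro k _
        rw [List.count_append]
        by_cases hkx : k = x
        · subst hkx
          simp
        · simp [List.count_singleton, beq_eq_decide]
          rw [if_neg (fun h => hkx h.symm), if_neg hkx]
      rw [List.map_congr_left hcnt,
        pvSumIndicator _ _ x ((PySem.Set.nodup_ofList xs).filter P), ih]
      have hmem : (x ∈ (PySem.Set.ofList xs).filter P) ↔ P x = true := by
        rw [List.mem_filter]
        exact ⟨fun h => h.2, fun h => ⟨hx, h⟩⟩
      rw [List.countP_append]
      by_cases hPx : P x = true
      · simp [hmem, hPx, List.countP_singleton] <;> push_cast <;> ring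
      · simp [hmem, hPx, List.countP_singleton] <;> push_cast <;> ring
    · rw [if_neg hx]
      have hx' : x ∉ xs := fun h => hx (by simpa [PySem.Set.mem_ofList] using h)
      rw [List.filter_append]
      have hcnt : ∀ k : List String, k ∈ (PySem.Set.ofList xs).filter P →
          (((xs ++ [x]).count k : Nat) : Int) = ((xs.count k : Nat) : Int) := by
        intro k hk
        have hkx : ¬ k = x := by
          intro h
          exact hx (h ▸ (List.mem_filter.1 hk).1)
        rw [List.count_append]
        simp [List.count_singleton, beq_eq_decide]
        intro h
        exact hkx h.symm
      rw [List.countP_append, List.map_append, List.sum_append, List.map_congr_left hcnt, ih]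
      by_cases hPx : P x = true
      · simp [List.filter_singleton, hPx, List.countP_singleton, List.count_append,
          List.count_eq_zero.2 hx', List.count_singleton] <;> push_cast <;> ring
      · simp [List.filter_singleton, hPx, List.countP_singleton] <;> push_cast <;> ring

-- the match in D_solution's spelled-out form is pvMSB
theorem pvMSB_iff (cs ps : List String) :
    pvMSB cs ps = true ↔
      (cs.length ≤ ps.length ∧ ∀ cp ∈ cs.zip ps,
        cp.1 = "-" ∨ cp.1 = cp.2 ∨
          (PySem.Str.strIsdigit cp.1 = true ∧ pvIntv cp.1 ≤ pvIntv cp.2)) := by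
  rw [pvMSB]
  simp only [Bool.and_eq_true, Bool.not_eq_true', decide_eq_false_iff_not, Nat.not_lt,
    List.all_eq_true]
  constructor
  · rintro ⟨h1, h2⟩
    exact ⟨h1, fun cp hcp => (pvPassB_iff cp.1 cp.2).1 (by simpa using h2 cp hcp)⟩
  · rintro ⟨h1, h2⟩
    exact ⟨h1, fun cp hcp => by simpa using (pvPassB_iff cp.1 cp.2).2 (h2 cp hcp)⟩

-- if the last condition is '-', A's matcher rejects every row
theorem pvMSA_last_dash (cs ps : List String) (h : cs.getLastD "" = "-") :
    pvMSA cs ps = false := by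
  unfold pvMSA
  rw [show (cs.getLastD "" == "-") = true from by rw [List.getLastD_eq_getLast?] at h; simp [h]]
  simp

-- if the last condition is not '-', A's matcher is B's matcher
theorem pvMSA_eq_MSB (cs ps : List String) (h : ¬ cs.getLastD "" = "-") :
    pvMSA cs ps = pvMSB cs ps := by
  unfold pvMSA pvMSB
  rw [show (cs.getLastD "" == "-") = false from by rw [List.getLastD_eq_getLast?] at h; simp [h]]
  simp

-- ===== VERDICT (by name: the statement is the Claim_ definition above) =====
theorem solution_spec : Claim_unchanged_solution := by
  intro info query _ _
  unfold Spec_solution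
  intro hnD
  rw [pvSolutionA, pvSolutionB]
  apply List.map_congr_left
  intro q hq
  rw [pvCountK]
  show ((info.map pvTokens).countP (fun p => pvMSA (pvCond q) p) : Int)
      = ((info.map pvTokens).countP (fun p => pvMSB (pvCond q) p) : Int)
  by_cases hlast : (pvCond q).getLastD "" = "-"
  · -- no row may match B here, else the input would be in D_
    have hnoB : ∀ p ∈ info.map pvTokens, ¬ pvMSB (pvCond q) p = true := by
      rintro p hp hB
      rcases List.mem_map.1 hp with ⟨i, hi, rfl⟩
      rcases (pvMSB_iff (pvCond q) (pvTokens i)).1 hB with ⟨h1, h2⟩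
      exact hnD ⟨q, hq, hlast, i, hi, h1, h2⟩
    have hnoA : ∀ p ∈ info.map pvTokens, ¬ pvMSA (pvCond q) p = true := by
      intro p _ hA
      rw [pvMSA_last_dash _ _ hlast] at hA
      exact absurd hA (by simp)
    rw [List.countP_eq_zero.2 hnoA, List.countP_eq_zero.2 hnoB]
  · apply congrArg
    apply List.countP_congr
    intro p _
    rw [pvMSA_eq_MSB _ _ hlast]

theorem solution_changed : Claim_changed_solution := by
  unfold Claim_changed_solution; decide

theorem solution_tight : Claim_exact_solution := by
  intro info query _ _ hD heq
  rcases hD with ⟨q, hq, hlast, i, hi, h1, h2⟩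
  rw [pvSolutionA, pvSolutionB] at heq
  have hfun := (List.map_inj_left).1 heq q hq
  rw [pvCountK] at hfun
  have hA0 : (info.map pvTokens).countP (fun p => pvMSA (pvCond q) p) = 0 :=
    List.countP_eq_zero.2 (fun p _ hA => by
      rw [pvMSA_last_dash _ _ hlast] at hA; exact absurd hA (by simp))
  have hBpos : 0 < (info.map pvTokens).countP (fun p => pvMSB (pvCond q) p) :=
    List.countP_pos_iff.2 ⟨pvTokens i, List.mem_map_of_mem hi,
      (pvMSB_iff (pvCond q) (pvTokens i)).2 ⟨h1, h2⟩⟩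
  have : ((info.map pvTokens).countP (fun p => pvMSA (pvCond q) p))
      = ((info.map pvTokens).countP (fun p => pvMSB (pvCond q) p)) := by
    exact_mod_cast hfun
  omega
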